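-- pv_equiv track=rewrite | github.com/MCooperBorkenhagen/wang_etal_2021 | experiment/randomization.py | respConstraints
-- ===== SOURCE A (Python) =====
-- YES='z'
--
-- NO='n'
--
-- def respConstraints(rand_block):
-- 	passTest=True
-- 	step = 5
-- #	for block in cond_blocks:
-- 	i = 0
-- 	while i < (len(rand_block)-step+1): # iterate through randomized ref number list
-- 		tempList = [resp[2] for resp in rand_block[i:i+step]]
-- #		print ('test03:',tempList) : ['n', 'z', 'n', 'n', 'z']
-- 		# get corr responses for each target type
-- 		correctRespList=[correctResponsesHelper(targetType) for targetType in tempList]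
-- #		print ('test02:',correctRespList)
-- 		if (correctRespList.count(YES) > 4) | (correctRespList.count(NO) > 4):
-- 			passTest = False
-- 			break
-- 		i=i+1
-- 	return passTest
--
-- def correctResponsesHelper(targetType):
--     correctResponse = ''
--     if targetType=='r':
--         correctResponse = YES   #z
--     if targetType=='o':
--         correctResponse = YES   #z
--     if targetType=='s':
--         correctResponse = NO    #n
--     if targetType=='u':
--         correctResponse = NO    #n
--     return correctResponse
-- ===== SOURCE B (Python) =====
-- YES = 'z'
-- NO = 'n'
--
-- _CORRECT = {'r': YES, 'o': YES, 's': NO, 'u': NO}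
--
-- def respConstraints(rand_block):
--     # single pass: track the previous correct-response value and the length of the
--     # current consecutive run; fail as soon as a run of 5 YES or 5 NO completes.
--     if len(rand_block) < 5:
--         return True
--     prev = None
--     run = 0
--     for resp in rand_block:
--         v = _CORRECT.get(resp[2], '')
--         if prev is not None and v == prev:
--             run = run + 1
--         else:
--             prev = v
--             run = 1
--         if run >= 5 and (v == YES or v == NO):
--             return False
--     return True
-- ===== Notes on version B (the rewrite author's own statement) =====
-- stated objective: simpler
-- what changed: Replaces the sliding-window rescan (recomputing correct responses for every 5-slice) with a single pass that maps each row to its correct response once and tracks a consecutive-run counter, failing when a run of 5 YES or 5 NO completes.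
import Mathlib
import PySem

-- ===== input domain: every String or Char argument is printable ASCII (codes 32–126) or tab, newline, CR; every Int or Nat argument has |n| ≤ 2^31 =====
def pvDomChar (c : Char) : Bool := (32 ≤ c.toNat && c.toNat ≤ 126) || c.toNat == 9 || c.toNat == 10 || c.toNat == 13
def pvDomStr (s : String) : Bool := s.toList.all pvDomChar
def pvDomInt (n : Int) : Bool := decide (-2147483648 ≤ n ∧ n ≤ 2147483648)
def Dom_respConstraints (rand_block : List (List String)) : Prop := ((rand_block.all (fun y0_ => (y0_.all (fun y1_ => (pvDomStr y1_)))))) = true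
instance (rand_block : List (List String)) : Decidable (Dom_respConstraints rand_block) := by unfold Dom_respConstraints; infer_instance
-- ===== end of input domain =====

-- B replaces A's sliding 5-window rescan (each row's correct response recomputed for up to
-- 5 overlapping windows) with a single pass keeping a consecutive-run counter; objective: simpler.

-- ===== PORT A =====
def pyYES : String := "z"
def pyNO : String := "n"

def correctResponsesHelper (targetType : String) : String :=
  let c := ""
  let c := if targetType == "r" then pyYES else c
  let c := if targetType == "o" then pyYES else c
  let c := if targetType == "s" then pyNO else c
  let c := if targetType == "u" then pyNO else c
  c

-- while i < len(rand_block)-step+1 (step = 5); resp[2] is pyGet? (IndexError excluded by Pre_)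
def respA_go (rand_block : List (List String)) (i : Int) : Bool :=
  if _h : i < (rand_block.length : Int) - 5 + 1 then
    let tempList := PySem.List.slice rand_block (some i) (some (i + 5))
    let correctRespList := tempList.map (fun resp => correctResponsesHelper ((PySem.List.pyGet? resp 2).getD ""))
    if 4 < correctRespList.count pyYES || 4 < correctRespList.count pyNO then false
    else respA_go rand_block (i + 1)
  else true
termination_by ((rand_block.length : Int) - 5 + 1 - i).toNat
decreasing_by omega

def respConstraints (rand_block : List (List String)) : Bool := respA_go rand_block 0

-- ===== PORT B =====
def bCorrect : PySem.Dict String String :=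
  PySem.Dict.ofList [("r", pyYES), ("o", pyYES), ("s", pyNO), ("u", pyNO)]

-- the for loop: prev is None ↦ none; resp[2] is pyGet? (IndexError excluded by Pre_)
def respB_go : List (List String) → Option String → Int → Bool
  | [], _, _ => true
  | resp :: rest, prev, run =>
    let v := PySem.Dict.getD bCorrect ((PySem.List.pyGet? resp 2).getD "") ""
    let pr : Option String × Int :=
      if prev.isSome && (some v == prev) then (prev, run + 1) else (some v, 1)
    if 5 ≤ pr.2 && (v == pyYES || v == pyNO) then false
    else respB_go rest pr.1 pr.2

def respConstraints_alt (rand_block : List (List String)) : Bool :=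
  if (rand_block.length : Int) < 5 then true
  else respB_go rand_block none 0

-- ===== PRECONDITION & SPEC =====
-- Pre_ excludes exactly the inputs on which both Pythons raise IndexError: a block of ≥ 5 rows
-- containing a row with fewer than 3 entries (resp[2] fails); blocks of fewer than 5 rows are
-- always admitted (A's window loop never runs there).
def Pre_respConstraints (rand_block : List (List String)) : Prop :=
  rand_block.length < 5 ∨ ∀ r ∈ rand_block, 3 ≤ r.length
instance (rand_block : List (List String)) : Decidable (Pre_respConstraints rand_block) := by
  unfold Pre_respConstraints; infer_instance

def pvWitness_respConstraints : List (List String) :=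
  [["a", "b", "r"], ["a", "b", "s"], ["a", "b", "r"], ["a", "b", "u"], ["a", "b", "o"]]

def Spec_respConstraints (rand_block : List (List String)) (out : Bool) : Prop := out = respConstraints_alt rand_block
instance (rand_block : List (List String)) (out : Bool) : Decidable (Spec_respConstraints rand_block out) := by unfold Spec_respConstraints; infer_instance

-- ===== CLAIM (what is proved, stated in full; the proofs are below) =====
def Claim_equal_respConstraints : Prop := ∀ (rand_block : List (List String)), Dom_respConstraints rand_block → Pre_respConstraints rand_block → Spec_respConstraints rand_block (respConstraints rand_block)

-- ===== LEMMAS AND PROOFS =====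

-- the correct response of a row, as both ports compute it
def gResp (resp : List String) : String :=
  correctResponsesHelper ((PySem.List.pyGet? resp 2).getD "")

def goodVal (v : String) : Bool := v == pyYES || v == pyNO

-- a failing window: 5 equal YES (or NO) responses starting at position j
def W5 (vs : List String) (j : Nat) : Prop :=
  (vs.drop j).take 5 = List.replicate 5 pyYES ∨ (vs.drop j).take 5 = List.replicate 5 pyNO

-- the carry: k pending copies of p just before vs complete a failing window inside vs
def cT (vs : List String) (p : String) (k : Int) : Prop :=
  goodVal p = true ∧ (5 - k).toNat ≤ vs.length ∧ vs.take (5 - k).toNat = List.replicate (5 - k).toNat p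

-- B's loop, over the response values only
def runV : List String → Option String → Int → Bool
  | [], _, _ => true
  | v :: rest, prev, run =>
    let pr : Option String × Int :=
      if prev.isSome && (some v == prev) then (prev, run + 1) else (some v, 1)
    if 5 ≤ pr.2 && goodVal v then false
    else runV rest pr.1 pr.2

-- count(a) > 4 on a 5-element list says: all five entries are a
lemma count_gt4 (w : List String) (a : String) (hw : w.length = 5) :
    4 < w.count a ↔ w = List.replicate 5 a := by
  constructor
  · intro h
    have hle := List.count_le_length (l := w) (a := a)
    have : w.count a = w.length := by omega
    rw [List.eq_replicate_iff]
    refine ⟨hw, fun b hb => ?_⟩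
    exact (List.count_eq_length.mp this b hb).symm
  · intro h; subst h; simp

lemma W5_nil (j : Nat) : ¬ W5 [] j := by simp [W5]

lemma W5_cons_succ (v : String) (rest : List String) (j : Nat) :
    W5 (v :: rest) (j + 1) ↔ W5 rest j := by simp [W5]

lemma forall_W5_cons (v : String) (rest : List String) :
    (∀ j, ¬ W5 (v :: rest) j) ↔ ¬ W5 (v :: rest) 0 ∧ ∀ j, ¬ W5 rest j := by
  constructor
  · intro h; exact ⟨h 0, fun j => (W5_cons_succ v rest j).mp.mt (h (j + 1))⟩
  · rintro ⟨h0, h⟩ j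
    cases j with
    | zero => exact h0
    | succ j => exact fun hw => h j ((W5_cons_succ v rest j).mp hw)

lemma W5_cons_zero (v : String) (rest : List String) :
    W5 (v :: rest) 0 ↔ cT rest v 1 := by
  have hlen : ∀ a : String, rest.take 4 = List.replicate 4 a → 4 ≤ rest.length := by
    intro a h
    have := congrArg List.length h
    simp [List.length_take] at this
    omega
  constructor
  · rintro (h | h) <;>
    · rw [show (5:Nat) = 4 + 1 from rfl, List.replicate_succ] at h
      simp only [List.drop_zero, List.take_succ_cons, List.cons.injEq] at h
      obtain ⟨rfl, h4⟩ := h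
      exact ⟨by simp [goodVal, pyYES, pyNO], by simpa using hlen _ h4, by simpa using h4⟩
  · rintro ⟨hg, hl, ht⟩
    have h4 : rest.take 4 = List.replicate 4 v := by simpa using ht
    simp only [goodVal, Bool.or_eq_true, beq_iff_eq] at hg
    rcases hg with rfl | rfl
    · left; simp [W5, List.replicate_succ, h4]
    · right; simp [W5, List.replicate_succ, h4]

lemma cT_mono (vs : List String) (p : String) {k k' : Int} (h : k ≤ k') :
    cT vs p k → cT vs p k' := by
  rintro ⟨hg, hl, ht⟩
  refine ⟨hg, by omega, ?_⟩
  calc vs.take (5 - k').toNat = (vs.take (5 - k).toNat).take (5 - k').toNat := by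
        rw [List.take_take]; congr 1; omega
    _ = (List.replicate (5 - k).toNat p).take (5 - k').toNat := by rw [ht]
    _ = List.replicate (5 - k').toNat p := by rw [List.take_replicate]; congr 1; omega

lemma cT_cons_ne (v p : String) (rest : List String) (k : Int)
    (hv : v ≠ p) (hg4 : goodVal p = true → k ≤ 4) : ¬ cT (v :: rest) p k := by
  rintro ⟨hg, hl, ht⟩
  have h1 : 1 ≤ (5 - k).toNat := by have := hg4 hg; omega
  rcases Nat.exists_eq_add_of_le h1 with ⟨m, hm⟩
  rw [show (5-k).toNat = m + 1 by omega, List.replicate_succ, List.take_succ_cons] at ht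
  exact hv (List.cons.injEq .. |>.mp ht).1

lemma cT_cons_eq (p : String) (rest : List String) (k : Int) (hk : 1 ≤ k)
    (hg4 : goodVal p = true → k + 1 ≤ 4) :
    cT (p :: rest) p k ↔ cT rest p (k + 1) := by
  constructor
  · rintro ⟨hg, hl, ht⟩
    have h2 : (5 - k).toNat = (5 - (k+1)).toNat + 1 := by have := hg4 hg; omega
    rw [h2, List.replicate_succ, List.take_succ_cons] at ht
    refine ⟨hg, ?_, (List.cons.injEq .. |>.mp ht).2⟩
    have := congrArg List.length (List.cons.injEq .. |>.mp ht).2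
    simp [List.length_take] at this; omega
  · rintro ⟨hg, hl, ht⟩
    have h2 : (5 - k).toNat = (5 - (k+1)).toNat + 1 := by have := hg4 hg; omega
    refine ⟨hg, by simp; omega, ?_⟩
    rw [h2, List.replicate_succ, List.take_succ_cons, ht]

lemma runV_some : ∀ (vs : List String) (p : String) (k : Int), 1 ≤ k → (goodVal p = true → k ≤ 4) →
    (runV vs (some p) k = true ↔ ¬ cT vs p k ∧ ∀ j, ¬ W5 vs j)
  | [], p, k, hk, hg => by
    simp only [runV, true_iff]
    refine ⟨fun hc => ?_, fun j => W5_nil j⟩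
    obtain ⟨hgood, hl, _⟩ := hc
    have := hg hgood
    simp at hl
    omega
  | v :: rest, p, k, hk, hg => by
    by_cases hv : v = p
    · subst hv
      by_cases htrip : 5 ≤ k + 1 ∧ goodVal v = true
      · have hfalse : runV (v :: rest) (some v) k = false := by
          simp [runV, htrip.1, htrip.2]
        have hk4 : k = 4 := by have := hg htrip.2; omega
        subst hk4
        exact iff_of_false (by simp [hfalse])
          (fun h => h.1 ⟨htrip.2, by simp, rfl⟩)
      · have hg' : goodVal v = true → k + 1 ≤ 4 := by
          intro hgv
          rcases not_and_or.mp htrip with h | h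
          · omega
          · exact absurd hgv h
        have hc2 : (decide (5 ≤ k + 1) && goodVal v) = false := by
          rcases not_and_or.mp htrip with h | h <;> simp [h]
        have hrec : runV (v :: rest) (some v) k = runV rest (some v) (k + 1) := by
          simp [runV, hc2]
        rw [hrec, runV_some rest v (k + 1) (by omega) hg']
        rw [forall_W5_cons, W5_cons_zero, cT_cons_eq v rest k hk hg']
        have himp : cT rest v 1 → cT rest v (k + 1) := cT_mono rest v (by omega)
        tauto
    · have hvp : (v == p) = false := by simp [hv]
      have hrec : runV (v :: rest) (some p) k = runV rest (some v) 1 := by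
        simp [runV, hvp]
      rw [hrec, runV_some rest v 1 (by omega) (fun _ => by omega)]
      rw [forall_W5_cons, W5_cons_zero]
      have hnc : ¬ cT (v :: rest) p k := cT_cons_ne v p rest k hv hg
      tauto

lemma runV_none : ∀ vs : List String, (runV vs none 0 = true ↔ ∀ j, ¬ W5 vs j)
  | [] => iff_of_true rfl (fun j => W5_nil j)
  | v :: rest => by
    have hrec : runV (v :: rest) none 0 = runV rest (some v) 1 := by
      simp [runV]
    rw [hrec, runV_some rest v 1 (by omega) (fun _ => by omega)]
    rw [forall_W5_cons, W5_cons_zero]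

lemma W5_of_long (vs : List String) (j : Nat) (h : vs.length < j + 5) : ¬ W5 vs j := by
  rintro (hw | hw) <;>
  · have := congrArg List.length hw
    simp [List.length_take, List.length_drop] at this
    omega

lemma window_eq (rb : List (List String)) (i : Nat) :
    (PySem.List.slice rb (some (i : Int)) (some ((i : Int) + 5))).map gResp
      = ((rb.map gResp).drop i).take 5 := by
  rw [PySem.List.slice_toNat rb (by omega) (by omega)]
  have h1 : ((i : Int)).toNat = i := by omega
  rw [h1]
  have h2 : ((i : Int) + 5).toNat - i = 5 := by omega
  rw [h2, List.map_take, List.map_drop]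

lemma respA_go_eq (rb : List (List String)) (i : Nat) :
    (respA_go rb (i : Int) = true ↔ ∀ j, i ≤ j → ¬ W5 (rb.map gResp) j) := by
  by_cases h : (i : Int) < (rb.length : Int) - 5 + 1
  · rw [respA_go, dif_pos h]
    have hw : (PySem.List.slice rb (some (i:Int)) (some ((i:Int) + 5))).map
        (fun resp => correctResponsesHelper ((PySem.List.pyGet? resp 2).getD "")) =
        ((rb.map gResp).drop i).take 5 := window_eq rb i
    have hlen5 : (((rb.map gResp).drop i).take 5).length = 5 := by
      simp [List.length_take, List.length_drop]; omega
    by_cases hbad : W5 (rb.map gResp) i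
    · have : (4 < (((rb.map gResp).drop i).take 5).count pyYES
          || 4 < (((rb.map gResp).drop i).take 5).count pyNO) = true := by
        rcases hbad with hw5 | hw5
        · simp only [Bool.or_eq_true, decide_eq_true_eq]
          exact Or.inl ((count_gt4 _ _ hlen5).mpr hw5)
        · simp only [Bool.or_eq_true, decide_eq_true_eq]
          exact Or.inr ((count_gt4 _ _ hlen5).mpr hw5)
      simp only [hw, this, if_true]
      exact iff_of_false (by simp) (fun hall => (hall i le_rfl) hbad)
    · have : (4 < (((rb.map gResp).drop i).take 5).count pyYES
          || 4 < (((rb.map gResp).drop i).take 5).count pyNO) = false := by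
        simp only [Bool.or_eq_false_iff, decide_eq_false_iff_not]
        constructor
        · intro hc; exact hbad (Or.inl ((count_gt4 _ _ hlen5).mp hc))
        · intro hc; exact hbad (Or.inr ((count_gt4 _ _ hlen5).mp hc))
      simp only [hw, this, Bool.false_eq_true, if_false]
      have hcast : ((i : Int) + 1) = ((i + 1 : Nat) : Int) := by push_cast; ring
      rw [hcast, respA_go_eq rb (i + 1)]
      constructor
      · intro hall j hij
        rcases Nat.eq_or_lt_of_le hij with rfl | hlt
        · exact hbad
        · exact hall j hlt
      · intro hall j hij; exact hall j (by omega)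
  · rw [respA_go, dif_neg h]
    refine iff_of_true rfl (fun j hij => W5_of_long _ _ ?_)
    simp only [List.length_map]
    omega
termination_by rb.length - i
decreasing_by omega

lemma helper_eq_dict (t : String) :
    correctResponsesHelper t = PySem.Dict.getD bCorrect t "" := by
  have hb : bCorrect = PySem.Dict.mk [("r", pyYES), ("o", pyYES), ("s", pyNO), ("u", pyNO)] := rfl
  rw [hb]
  by_cases h1 : t = "r"
  · subst h1; rfl
  by_cases h2 : t = "o"
  · subst h2; rfl
  by_cases h3 : t = "s"
  · subst h3; rfl
  by_cases h4 : t = "u"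
  · subst h4; rfl
  have e1 : ("r" == t) = false := by simp [Ne.symm h1]
  have e2 : ("o" == t) = false := by simp [Ne.symm h2]
  have e3 : ("s" == t) = false := by simp [Ne.symm h3]
  have e4 : ("u" == t) = false := by simp [Ne.symm h4]
  simp [correctResponsesHelper, PySem.Dict.getD, PySem.Dict.get?, List.find?,
    h1, h2, h3, h4, e1, e2, e3, e4]

lemma respB_go_eq_runV : ∀ (rb : List (List String)) (prev : Option String) (run : Int),
    respB_go rb prev run = runV (rb.map gResp) prev run
  | [], _, _ => rfl
  | resp :: rest, prev, run => by
    have hv : PySem.Dict.getD bCorrect ((PySem.List.pyGet? resp 2).getD "") "" = gResp resp :=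
      (helper_eq_dict _).symm
    simp only [respB_go, List.map_cons, runV, hv, goodVal]
    split <;> split <;> first | rfl | exact respB_go_eq_runV rest _ _

-- ===== VERDICT (by name: the statement is the Claim_ definition above) =====
theorem respConstraints_spec : Claim_equal_respConstraints := by
  intro rb _ _
  unfold Spec_respConstraints
  have hA : respConstraints rb = respA_go rb ((0 : Nat) : Int) := by norm_num [respConstraints]
  by_cases h5 : (rb.length : Int) < 5
  · have : respA_go rb ((0 : Nat) : Int) = true := by
      rw [respA_go_eq rb 0]
      intro j _
      exact W5_of_long _ _ (by simp; omega)
    rw [hA, this, respConstraints_alt, if_pos h5]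
  · rw [hA, respConstraints_alt, if_neg h5, respB_go_eq_runV]
    rw [Bool.eq_iff_iff, respA_go_eq rb 0, runV_none]
    constructor
    · intro h j; exact h j (Nat.zero_le j)
    · intro h j _; exact h j
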